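-- pv_equiv track=rewrite | github.com/devThinKoki/learning_repo | JetBrains_Academy/Python_Development_Course/Easy_Dominoes/Functions.py | calculate_rarity
-- ===== SOURCE A (Python) =====
-- def calculate_rarity(rarity_pieces, pieces1, pieces2):
--     for piece in pieces1:
--         ele1, ele2 = piece[0], piece[1]
--         rarity_pieces[ele1] += 1
--         rarity_pieces[ele2] += 1
--     for piece in pieces2:
--         ele1, ele2 = piece[0], piece[1]
--         rarity_pieces[ele1] += 1
--         rarity_pieces[ele2] += 1
--     return rarity_pieces
-- ===== SOURCE B (Python) =====
-- def calculate_rarity(rarity_pieces, pieces1, pieces2):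
--     # Sort-then-scan: flatten both piece lists into one value stream, sort it
--     # so equal values sit in one run, then add each run's length with a single
--     # increment per run.
--     vals = sorted([v for piece in pieces1 for v in piece] +
--                   [v for piece in pieces2 for v in piece])
--     n = len(vals)
--     i = 0
--     while i < n:
--         j = i
--         while j < n and vals[j] == vals[i]:
--             j += 1
--         rarity_pieces[vals[i]] += j - i
--         i = j
--     return rarity_pieces
-- ===== Notes on version B (the rewrite author's own statement) =====
-- stated objective: alternative
-- what changed: B replaces A's per-piece increment loops with a sort-then-scan: it flattens both piece lists into one value stream, sorts it so equal values form contiguous runs, and adds each run's length with a single increment per run.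
import Mathlib
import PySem

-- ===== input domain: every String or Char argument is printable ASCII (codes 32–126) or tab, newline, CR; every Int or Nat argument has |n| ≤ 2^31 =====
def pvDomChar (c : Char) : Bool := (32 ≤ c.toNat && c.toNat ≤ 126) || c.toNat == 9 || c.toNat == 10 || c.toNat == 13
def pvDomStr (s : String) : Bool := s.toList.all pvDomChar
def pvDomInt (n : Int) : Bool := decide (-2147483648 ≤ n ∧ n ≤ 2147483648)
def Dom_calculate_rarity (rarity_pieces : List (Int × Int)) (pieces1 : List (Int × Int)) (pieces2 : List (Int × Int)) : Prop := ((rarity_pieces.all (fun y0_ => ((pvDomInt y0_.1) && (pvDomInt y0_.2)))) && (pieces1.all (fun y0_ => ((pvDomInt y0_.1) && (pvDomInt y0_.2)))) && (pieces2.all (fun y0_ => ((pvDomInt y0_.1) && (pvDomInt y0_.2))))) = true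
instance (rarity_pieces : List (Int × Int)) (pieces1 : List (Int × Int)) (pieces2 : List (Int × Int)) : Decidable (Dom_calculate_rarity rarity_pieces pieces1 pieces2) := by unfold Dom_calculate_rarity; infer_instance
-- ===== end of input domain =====

-- B replaces A's per-piece increments with sort-then-scan: it sorts the flattened value stream so
-- equal values form contiguous runs, then adds each run's length with one increment per run.
-- rarity_pieces is a Python dict value->count (here: association list); both A and B mutate it in
-- place to the SAME final state on Pre_ inputs — the equivalence proved is about the return value.

-- ===== PORT A =====
-- 'rarity_pieces[ele] += 1' on the dict: KeyError (none) if the key is absent, else overwrite in place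
def pvInc1 (d : PySem.Dict Int Int) (ele : Int) : Option (PySem.Dict Int Int) :=
  match d.get? ele with
  | none => none                              -- KeyError
  | some v => some (d.insert ele (v + 1))

-- one 'for piece in pieces:' loop of A, in the Option (raise) monad
def pvLoopA (st : Option (PySem.Dict Int Int)) (pieces : List (Int × Int)) : Option (PySem.Dict Int Int) :=
  pieces.foldl (fun st piece =>
    st.bind fun d => (pvInc1 d piece.1).bind fun d' => pvInc1 d' piece.2) st

def calculate_rarity (rarity_pieces : List (Int × Int)) (pieces1 : List (Int × Int)) (pieces2 : List (Int × Int)) : List (Int × Int) :=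
  match pvLoopA (pvLoopA (some (PySem.Dict.ofList rarity_pieces)) pieces1) pieces2 with
  | some d => d.items
  | none => []      -- Python raises KeyError here; such inputs are outside Pre_ and unclaimed

-- ===== PORT B =====
-- 'rarity_pieces[vals[i]] += j - i' on the dict: KeyError (none) if the key is absent
def pvIncBy (d : PySem.Dict Int Int) (v c : Int) : Option (PySem.Dict Int Int) :=
  match d.get? v with
  | none => none                              -- KeyError
  | some w => some (d.insert v (w + c))

-- Source B's index-scanning while loops as the obvious structural recursion: the inner
-- 'while j < n and vals[j] == vals[i]' is the takeWhile/dropWhile split of the current run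
def pvRunScan (d : PySem.Dict Int Int) : List Int → Option (PySem.Dict Int Int)
  | [] => some d
  | v :: rest =>
    match pvIncBy d v (1 + ((rest.takeWhile (· == v)).length : Int)) with
    | none => none                            -- KeyError propagates
    | some d' => pvRunScan d' (rest.dropWhile (· == v))
termination_by vs => vs.length
decreasing_by
  simp only [List.length_cons]
  exact Nat.lt_succ_of_le (List.length_dropWhile_le _ _)

def calculate_rarity_alt (rarity_pieces : List (Int × Int)) (pieces1 : List (Int × Int)) (pieces2 : List (Int × Int)) : List (Int × Int) :=
  -- the two flattening comprehensions, concatenated, then sorted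
  let vals := PySem.List.sorted
    (pieces1.flatMap (fun piece => [piece.1, piece.2])
      ++ pieces2.flatMap (fun piece => [piece.1, piece.2])) (fun v => v)
  match pvRunScan (PySem.Dict.ofList rarity_pieces) vals with
  | some d => d.items
  | none => []      -- Python raises KeyError here; such inputs are outside Pre_ and unclaimed

-- ===== PRECONDITION & SPEC =====
-- Pre_ excludes exactly the inputs on which the Python A raises KeyError: some piece value is not
-- a key of rarity_pieces (B raises there too). Distinct keys are required because rarity_pieces is
-- a Python dict, whose association-list encoding never carries a duplicate key.
def Pre_calculate_rarity (rarity_pieces : List (Int × Int)) (pieces1 : List (Int × Int)) (pieces2 : List (Int × Int)) : Prop :=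
  (rarity_pieces.map Prod.fst).Nodup ∧
  ∀ p ∈ pieces1 ++ pieces2, p.1 ∈ rarity_pieces.map Prod.fst ∧ p.2 ∈ rarity_pieces.map Prod.fst
instance (rarity_pieces : List (Int × Int)) (pieces1 : List (Int × Int)) (pieces2 : List (Int × Int)) : Decidable (Pre_calculate_rarity rarity_pieces pieces1 pieces2) := by unfold Pre_calculate_rarity; infer_instance

def pvWitness_calculate_rarity : (List (Int × Int)) × (List (Int × Int)) × (List (Int × Int)) :=
  ([(1, 2), (0, 3)], [(0, 1), (1, 1)], [(0, 0)])

def Spec_calculate_rarity (rarity_pieces : List (Int × Int)) (pieces1 : List (Int × Int)) (pieces2 : List (Int × Int)) (out : List (Int × Int)) : Prop := out = calculate_rarity_alt rarity_pieces pieces1 pieces2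
instance (rarity_pieces : List (Int × Int)) (pieces1 : List (Int × Int)) (pieces2 : List (Int × Int)) (out : List (Int × Int)) : Decidable (Spec_calculate_rarity rarity_pieces pieces1 pieces2 out) := by unfold Spec_calculate_rarity; infer_instance

-- ===== CLAIM (what is proved, stated in full; the proofs are below) =====
def Claim_equal_calculate_rarity : Prop := ∀ (rarity_pieces : List (Int × Int)) (pieces1 : List (Int × Int)) (pieces2 : List (Int × Int)), Dom_calculate_rarity rarity_pieces pieces1 pieces2 → Pre_calculate_rarity rarity_pieces pieces1 pieces2 → Spec_calculate_rarity rarity_pieces pieces1 pieces2 (calculate_rarity rarity_pieces pieces1 pieces2)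

-- ===== LEMMAS AND PROOFS =====

-- the flattened stream of values of a piece list, in A's visiting order
def pvFlat (ps : List (Int × Int)) : List Int := ps.flatMap (fun p => [p.1, p.2])

-- the common shape both final dicts take: every stored count bumped by cnt of its key
def pvBump (d : PySem.Dict Int Int) (cnt : Int → Int) : PySem.Dict Int Int :=
  PySem.Dict.mk (d.items.map (fun kv => (kv.1, kv.2 + cnt kv.1)))

theorem pvLoopA_eq_flat (ps : List (Int × Int)) (st : Option (PySem.Dict Int Int)) :
    pvLoopA st ps = (pvFlat ps).foldl (fun st v => st.bind fun d => pvInc1 d v) st := by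
  induction ps generalizing st with
  | nil => rfl
  | cons p ps ih => simp [pvLoopA, pvFlat, List.foldl] at ih ⊢; rw [ih]; congr 1; cases st <;> rfl

theorem pvBump_zero (d : PySem.Dict Int Int) (cnt : Int → Int) (h : ∀ k, cnt k = 0) :
    pvBump d cnt = d := by
  apply PySem.Dict.ext; simp [pvBump, h]

-- A's increment loop computes pvBump with cnt = occurrence count
theorem pvLemA (vs : List Int) (d : PySem.Dict Int Int) (hnd : d.keys.Nodup)
    (hc : ∀ v ∈ vs, d.contains v = true) :
    vs.foldl (fun st v => st.bind fun dd => pvInc1 dd v) (some d)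
      = some (pvBump d (fun k => (vs.count k : Int))) := by
  induction vs generalizing d with
  | nil => simp [pvBump_zero]
  | cons v vs ih =>
    have hcv : d.contains v = true := hc v (List.mem_cons_self ..)
    cases hval : d.get? v with
    | none =>
      rw [PySem.Dict.get?_eq_none_iff_contains] at hval; rw [hval] at hcv; cases hcv
    | some val =>
      rw [List.foldl_cons]
      have hstep : (some d).bind (fun dd => pvInc1 dd v) = some (d.insert v (val + 1)) := by
        simp [pvInc1, hval]
      rw [hstep, ih (d.insert v (val + 1)) (PySem.Dict.nodup_keys_insert _ _ _ hnd)
        (fun u hu => by rw [PySem.Dict.contains_insert]; simp [hc u (List.mem_cons_of_mem _ hu)])]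
      congr 1
      simp only [pvBump]
      congr 1
      rw [PySem.Dict.items_insert_of_contains _ _ hcv, List.map_map]
      apply List.map_congr_left
      intro kv hkv
      have hkv2 : d.get? kv.1 = some kv.2 := PySem.Dict.get?_of_mem_items d (by simpa using hkv) hnd
      by_cases hk : kv.1 = v
      · rw [hk] at hkv2; rw [hval] at hkv2
        simp only [Function.comp_apply, hk, beq_self_eq_true, if_pos]
        rw [List.count_cons]
        simp only [beq_self_eq_true, if_pos]
        push_cast
        rw [Option.some.injEq] at hkv2
        rw [hkv2]
        exact congrArg (Prod.mk _) (by ring)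
      · simp only [Function.comp_apply, beq_iff_eq, hk, if_false]
        rw [List.count_cons]
        have : (v == kv.1) = false := by simp [Ne.symm hk]
        simp [this]

-- B's run scan computes pvBump with the same cnt: each run of equal values contributes its
-- length at once, and the runs of a value k together hold exactly its count k occurrences
theorem pvLemB (d : PySem.Dict Int Int) (vs : List Int) (hnd : d.keys.Nodup)
    (hc : ∀ v ∈ vs, d.contains v = true) :
    pvRunScan d vs = some (pvBump d (fun k => (vs.count k : Int))) := by
  induction d, vs using pvRunScan.induct with
  | case1 d => simp [pvRunScan, pvBump_zero]
  | case2 d v rest hnone =>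
    exfalso
    have hcv : d.contains v = true := hc v (List.mem_cons_self ..)
    cases hval : d.get? v with
    | none =>
      rw [PySem.Dict.get?_eq_none_iff_contains] at hval; rw [hval] at hcv; cases hcv
    | some w => simp [pvIncBy, hval] at hnone
  | case3 d v rest d' hsome ih =>
    obtain ⟨w, hval, hd'⟩ : ∃ w, d.get? v = some w
        ∧ d' = d.insert v (w + (1 + ((rest.takeWhile (· == v)).length : Int))) := by
      cases hval : d.get? v with
      | none => simp [pvIncBy, hval] at hsome
      | some w => refine ⟨w, rfl, ?_⟩; simp [pvIncBy, hval] at hsome; exact hsome.symm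
    have hsplit : rest = rest.takeWhile (· == v) ++ rest.dropWhile (· == v) :=
      (List.takeWhile_append_dropWhile).symm
    have hrun : ∀ x ∈ rest.takeWhile (· == v), x = v := by
      intro x hx
      have := List.mem_takeWhile_imp hx
      simpa using this
    have hnd' : d'.keys.Nodup := by rw [hd']; exact PySem.Dict.nodup_keys_insert _ _ _ hnd
    have hc' : ∀ u ∈ rest.dropWhile (· == v), d'.contains u = true := by
      intro u hu
      have humem : u ∈ v :: rest := by
        refine List.mem_cons_of_mem _ ?_
        rw [hsplit]; exact List.mem_append_right _ hu
      rw [hd', PySem.Dict.contains_insert]; simp [hc u humem]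
    rw [pvRunScan]
    simp only [hsome]
    rw [ih hnd' hc']
    congr 1
    apply PySem.Dict.ext
    simp only [pvBump, hd']
    have hcv : d.contains v = true := by
      rw [PySem.Dict.contains_eq_isSome_get?, hval]; rfl
    rw [PySem.Dict.items_insert_of_contains _ _ hcv, List.map_map]
    apply List.map_congr_left
    intro kv hkv
    have hkv2 : d.get? kv.1 = some kv.2 := PySem.Dict.get?_of_mem_items d (by simpa using hkv) hnd
    have hcnt : ∀ k, (v :: rest).count k
        = (if k = v then 1 + (rest.takeWhile (· == v)).length else 0)
          + (rest.dropWhile (· == v)).count k := by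
      intro k
      rw [List.count_cons]
      conv_lhs => rw [hsplit]
      rw [List.count_append]
      by_cases hk : k = v
      · subst hk
        have : (rest.takeWhile (· == k)).count k = (rest.takeWhile (· == k)).length :=
          List.count_eq_length.mpr (fun b hb => ((hrun b hb).symm : k = b))
        simp [this]; omega
      · have : (rest.takeWhile (· == v)).count k = 0 :=
          List.count_eq_zero.mpr (fun hmem => hk (hrun _ hmem))
        have hkv' : (k == v) = false := by simp [hk]
        simp [this, hk, Ne.symm hk]
    by_cases hk : kv.1 = v
    · rw [hk] at hkv2; rw [hval] at hkv2
      rw [Option.some.injEq] at hkv2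
      simp only [Function.comp_apply, hk, beq_self_eq_true, if_pos]
      rw [hcnt v, if_pos rfl]
      rw [hkv2]
      push_cast
      exact congrArg (Prod.mk _) (by ring)
    · have hb : (kv.1 == v) = false := by simp [hk]
      simp only [Function.comp_apply, hb]
      rw [hcnt kv.1]
      simp [hk]

-- the association list of the dict parameter, under distinct keys
theorem pvItems_ofList (rp : List (Int × Int)) (hnd : (rp.map Prod.fst).Nodup) :
    (PySem.Dict.ofList rp).items = rp := by
  unfold PySem.Dict.ofList PySem.Dict.update
  rw [PySem.Dict.items_foldl_insert_fresh rp Prod.fst Prod.snd PySem.Dict.empty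
    (fun a _ => PySem.Dict.contains_empty _) hnd]
  simp [PySem.Dict.empty]

-- ===== VERDICT (by name: the statement is the Claim_ definition above) =====
theorem calculate_rarity_spec : Claim_equal_calculate_rarity := by
  intro rp p1 p2 _hdom hpre
  obtain ⟨hnd, hmem⟩ := hpre
  have hitems : (PySem.Dict.ofList rp).items = rp := pvItems_ofList rp hnd
  have hkeys : (PySem.Dict.ofList rp).keys = rp.map Prod.fst := by
    simp only [PySem.Dict.keys, hitems]
  have hknd : (PySem.Dict.ofList rp).keys.Nodup := by rw [hkeys]; exact hnd
  have hcont : ∀ v ∈ pvFlat p1 ++ pvFlat p2, (PySem.Dict.ofList rp).contains v = true := by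
    intro v hv
    rw [PySem.Dict.contains_iff_mem_keys, hkeys]
    rcases List.mem_append.mp hv with h | h <;>
    · rcases List.mem_flatMap.mp h with ⟨p, hp, hvp⟩
      have := hmem p (by simp [hp])
      simp only [List.mem_cons] at hvp
      rcases hvp with rfl | hvp
      · exact this.1
      · simp only [List.not_mem_nil, or_false] at hvp; rw [hvp]; exact this.2
  -- A's side: one increment per occurrence, over the flattened value stream
  have hA : calculate_rarity rp p1 p2
      = (pvBump (PySem.Dict.ofList rp) (fun k => (((pvFlat p1 ++ pvFlat p2).count k : Int)))).items := by
    unfold calculate_rarity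
    rw [pvLoopA_eq_flat, pvLoopA_eq_flat, ← List.foldl_append,
      pvLemA _ _ hknd hcont]
  -- B's side: one increment per run of the sorted stream; sorting permutes, so counts agree
  have hperm : (PySem.List.sorted (pvFlat p1 ++ pvFlat p2) (fun v => v)).Perm
      (pvFlat p1 ++ pvFlat p2) := PySem.List.sorted_perm _ _ _
  have hB : calculate_rarity_alt rp p1 p2
      = (pvBump (PySem.Dict.ofList rp) (fun k => (((pvFlat p1 ++ pvFlat p2).count k : Int)))).items := by
    show (match pvRunScan (PySem.Dict.ofList rp)
        (PySem.List.sorted (pvFlat p1 ++ pvFlat p2) (fun v => v)) with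
      | some d => d.items
      | none => []) = _
    rw [pvLemB _ _ hknd (fun v hv => hcont v (hperm.mem_iff.mp hv))]
    have : (fun k => (((PySem.List.sorted (pvFlat p1 ++ pvFlat p2) (fun v => v)).count k : Int)))
        = fun k => (((pvFlat p1 ++ pvFlat p2).count k : Int)) :=
      funext fun k => by rw [hperm.count_eq]
    rw [this]
  unfold Spec_calculate_rarity
  rw [hA, hB]
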